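-- pv_equiv track=rewrite | github.com/dawangran/IsoPrep | IsoPrep/bin/scan_cb_umi.py | correct_cb_10mer
-- ===== SOURCE A (Python) =====
-- def hamdist(a, b):
--     d = 0
--     for i in range(10):
--         if a[i] != b[i]:
--             d += 1
--     return d
--
-- def correct_cb_10mer(obs, wl, allow_ham2_unique=False):
--     """
--     Return (corr, status, dmin).
--     status ∈ {"EXACT","HAM1","HAM2_MIN_UNIQ","UNCORR"}
--     """
--     if obs is None or len(obs) != 10:
--         return None, "UNCORR", None
--     best = None
--     best_d = 11
--     best_count = 0
--     for w in wl:
--         d = hamdist(obs, w)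
--         if d < best_d:
--             best_d = d; best = w; best_count = 1
--         elif d == best_d:
--             best_count += 1
--         if d == 0:
--             return w, "EXACT", 0
--     if best_d == 1 and best_count == 1:
--         return best, "HAM1", 1
--     if allow_ham2_unique and best_d == 2 and best_count == 1:
--         return best, "HAM2_MIN_UNIQ", 2
--     return None, "UNCORR", best_d
-- ===== SOURCE B (Python) =====
-- def correct_cb_10mer(obs, wl, allow_ham2_unique=False):
--     """
--     Return (corr, status, dmin).
--     status ∈ {"EXACT","HAM1","HAM2_MIN_UNIQ","UNCORR"}
--     Two-phase decomposition: find-first exact match, then distances as a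
--     list aggregated with min / count / index, instead of one stateful
--     online loop with early return.
--     """
--     if obs is None or len(obs) != 10:
--         return None, "UNCORR", None
--     exact = next((w for w in wl if w[:10] == obs), None)
--     if exact is not None:
--         return exact, "EXACT", 0
--     dists = [sum(x != y for x, y in zip(obs, w)) for w in wl]
--     best_d = min(dists, default=11)
--     if dists.count(best_d) == 1:
--         best = wl[dists.index(best_d)]
--         if best_d == 1:
--             return best, "HAM1", 1
--         if allow_ham2_unique and best_d == 2:
--             return best, "HAM2_MIN_UNIQ", 2
--     return None, "UNCORR", best_d
-- ===== Notes on version B (the rewrite author's own statement) =====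
-- stated objective: alternative
-- what changed: Replaces A's single stateful online loop (running best/best_d/best_count with an early return) by a two-phase decomposition: a find-first scan for an exact prefix match, then a list of distances aggregated with min/count/index.
import Mathlib
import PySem

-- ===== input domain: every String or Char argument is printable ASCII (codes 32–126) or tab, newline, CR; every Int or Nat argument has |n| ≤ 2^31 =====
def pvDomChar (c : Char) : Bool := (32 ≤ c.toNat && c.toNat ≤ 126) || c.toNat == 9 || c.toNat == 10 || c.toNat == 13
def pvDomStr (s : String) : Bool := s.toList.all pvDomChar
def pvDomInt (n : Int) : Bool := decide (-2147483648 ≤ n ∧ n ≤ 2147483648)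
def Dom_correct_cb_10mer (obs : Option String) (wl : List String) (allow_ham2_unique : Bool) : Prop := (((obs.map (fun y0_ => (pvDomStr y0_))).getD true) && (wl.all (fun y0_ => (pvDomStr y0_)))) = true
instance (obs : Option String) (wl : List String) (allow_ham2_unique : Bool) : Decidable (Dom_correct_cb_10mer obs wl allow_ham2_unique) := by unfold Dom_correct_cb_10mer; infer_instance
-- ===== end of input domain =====

-- B replaces A's single stateful online loop (running best/best_d/best_count with early return)
-- by a find-first exact scan plus min/count/index aggregation of a distance list
-- (objective: alternative decomposition, same asymptotic cost).

-- ===== PORT A =====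
-- hamdist(a, b): a[i]/b[i] are in range wherever the Python returns (len a = 10, len b ≥ 10
-- inside Pre_); Python raises IndexError for shorter b, which Pre_ excludes.
def pvHamdist (a b : List Char) : Int :=
  (List.range 10).foldl (fun d i => if a.getD i ' ' ≠ b.getD i ' ' then d + 1 else d) 0

def pvLoopA (a : List Char) (allow : Bool) :
    List String → Option String → Int → Int → Option String × String × Option Int
  | [], best, best_d, best_count =>
    if best_d = 1 ∧ best_count = 1 then (best, "HAM1", some 1)
    else if allow = true ∧ best_d = 2 ∧ best_count = 1 then (best, "HAM2_MIN_UNIQ", some 2)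
    else (none, "UNCORR", some best_d)
  | w :: ws, best, best_d, best_count =>
    let d := pvHamdist a w.toList
    let st : Option String × Int × Int :=
      if d < best_d then (some w, d, 1)
      else if d = best_d then (best, best_d, best_count + 1)
      else (best, best_d, best_count)
    if d = 0 then (some w, "EXACT", some 0)
    else pvLoopA a allow ws st.1 st.2.1 st.2.2

def correct_cb_10mer (obs : Option String) (wl : List String) (allow_ham2_unique : Bool) :
    Option String × String × Option Int :=
  match obs with
  | none => (none, "UNCORR", none)
  | some s =>
    if s.toList.length ≠ 10 then (none, "UNCORR", none)
    else pvLoopA s.toList allow_ham2_unique wl none 11 0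

-- ===== PORT B =====
-- sum(x != y for x, y in zip(obs, w))
def pvMismatch (a b : List Char) : Int :=
  (a.zip b).foldl (fun acc p => if p.1 ≠ p.2 then acc + 1 else acc) 0

def correct_cb_10mer_alt (obs : Option String) (wl : List String) (allow_ham2_unique : Bool) :
    Option String × String × Option Int :=
  match obs with
  | none => (none, "UNCORR", none)
  | some s =>
    if s.toList.length ≠ 10 then (none, "UNCORR", none)
    else
      -- next((w for w in wl if w[:10] == obs), None); w[:10] is take 10
      match wl.find? (fun w => w.toList.take 10 == s.toList) with
      | some w => (some w, "EXACT", some 0)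
      | none =>
        let dists := wl.map (fun w => pvMismatch s.toList w.toList)
        let best_d := (PySem.List.min? dists (fun x => x)).getD 11  -- min(dists, default=11)
        if (PySem.List.count dists best_d : Int) = 1 then
          -- wl[dists.index(best_d)]; inside this branch the index exists
          let best := (PySem.List.index? dists best_d).bind
            (fun i => PySem.List.pyGet? wl (i : Int))
          if best_d = 1 then (best, "HAM1", some 1)
          else if allow_ham2_unique = true ∧ best_d = 2 then (best, "HAM2_MIN_UNIQ", some 2)
          else (none, "UNCORR", some best_d)
        else (none, "UNCORR", some best_d)

-- ===== PRECONDITION & SPEC =====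
-- Pre_ excludes inputs where obs is a 10-mer but some whitelist entry is shorter than 10
-- characters: there A raises IndexError in hamdist unless an exact match occurs earlier in
-- the list (B always returns a value).
def Pre_correct_cb_10mer (obs : Option String) (wl : List String) (allow_ham2_unique : Bool) : Prop :=
  (obs.all (fun s => s.toList.length != 10 || wl.all (fun w => decide (10 ≤ w.toList.length)))) = true
instance (obs : Option String) (wl : List String) (allow_ham2_unique : Bool) : Decidable (Pre_correct_cb_10mer obs wl allow_ham2_unique) := by unfold Pre_correct_cb_10mer; infer_instance

def pvWitness_correct_cb_10mer : Option String × List String × Bool :=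
  (some "AAAAAAAAAA", ["AAAAAAAAAC", "AAAAAAAAAA"], false)

def Spec_correct_cb_10mer (obs : Option String) (wl : List String) (allow_ham2_unique : Bool) (out : Option String × String × Option Int) : Prop := out = correct_cb_10mer_alt obs wl allow_ham2_unique
instance (obs : Option String) (wl : List String) (allow_ham2_unique : Bool) (out : Option String × String × Option Int) : Decidable (Spec_correct_cb_10mer obs wl allow_ham2_unique out) := by unfold Spec_correct_cb_10mer; infer_instance

-- ===== CLAIM (what is proved, stated in full; the proofs are below) =====
def Claim_equal_correct_cb_10mer : Prop := ∀ (obs : Option String) (wl : List String) (allow_ham2_unique : Bool), Dom_correct_cb_10mer obs wl allow_ham2_unique → Pre_correct_cb_10mer obs wl allow_ham2_unique → Spec_correct_cb_10mer obs wl allow_ham2_unique (correct_cb_10mer obs wl allow_ham2_unique)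

-- ===== LEMMAS AND PROOFS =====

theorem hamdist_countP (a b : List Char) :
    pvHamdist a b = ((List.range 10).countP (fun i => a.getD i ' ' != b.getD i ' ') : Nat) := by
  unfold pvHamdist
  rw [PySem.List.foldl_ite_add_one (fun i => a.getD i ' ' ≠ b.getD i ' ')]
  rw [Int.zero_add]
  congr 1
  apply List.countP_congr
  intro i _
  simp [bne]

theorem hamdist_nonneg (a b : List Char) : 0 ≤ pvHamdist a b := by
  rw [hamdist_countP]; positivity

theorem hamdist_le_ten (a b : List Char) : pvHamdist a b ≤ 10 := by
  rw [hamdist_countP]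
  have := List.countP_le_length (l := List.range 10) (p := fun i => a.getD i ' ' != b.getD i ' ')
  simp at this
  exact_mod_cast this

theorem zip_eq_range_map (a b : List Char) (ha : a.length = 10) (hb : 10 ≤ b.length) :
    a.zip b = (List.range 10).map (fun i => (a.getD i ' ', b.getD i ' ')) := by
  apply List.ext_getElem
  · simp [ha, Nat.min_eq_left hb]
  · intro i h1 h2
    have hia : i < a.length := by simp [ha] at h1 ⊢; omega
    have hib : i < b.length := by simp [ha] at h1; omega
    simp [List.getElem_zip, hia, hib]

theorem hamdist_eq_mismatch (a b : List Char) (ha : a.length = 10) (hb : 10 ≤ b.length) :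
    pvHamdist a b = pvMismatch a b := by
  unfold pvHamdist pvMismatch
  rw [zip_eq_range_map a b ha hb, List.foldl_map]

theorem hamdist_zero_iff (a b : List Char) (ha : a.length = 10) (hb : 10 ≤ b.length) :
    pvHamdist a b = 0 ↔ b.take 10 = a := by
  rw [hamdist_countP]
  constructor
  · intro h
    have hc : (List.range 10).countP (fun i => a.getD i ' ' != b.getD i ' ') = 0 := by exact_mod_cast h
    rw [List.countP_eq_zero] at hc
    apply List.ext_getElem
    · simp [ha]; omega
    · intro i h1 h2
      have hi : i < 10 := by simp at h1; omega
      have hia : i < a.length := by omega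
      have hib : i < b.length := by omega
      have := hc i (by simp [hi])
      simp [hia, hib] at this
      rw [List.getElem_take]
      exact this.symm
  · intro h
    have hc : ∀ i ∈ List.range 10, ¬ ((fun i => a.getD i ' ' != b.getD i ' ') i = true) := by
      intro i hi
      simp at hi
      have hia : i < a.length := by omega
      have hib : i < b.length := by omega
      have heq : b[i] = a[i] := by
        have h2 := congrArg (fun l => l[i]?) h
        simp only [List.getElem?_take, hi, if_pos, List.getElem?_eq_getElem, hia, hib] at h2
        exact Option.some.inj h2
      simp [hia, hib, heq]
    rw [List.countP_eq_zero.mpr hc]; simp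


def pvMsF (a : List Char) : List String → Option String × Int × Int → Option String × Int × Int
  | [], st => st
  | w :: ws, st =>
    let d := pvHamdist a w.toList
    pvMsF a ws
      (if d < st.2.1 then (some w, d, 1)
       else if d = st.2.1 then (st.1, st.2.1, st.2.2 + 1)
       else st)

def pvFin (allow : Bool) (st : Option String × Int × Int) : Option String × String × Option Int :=
  if st.2.1 = 1 ∧ st.2.2 = 1 then (st.1, "HAM1", some 1)
  else if allow = true ∧ st.2.1 = 2 ∧ st.2.2 = 1 then (st.1, "HAM2_MIN_UNIQ", some 2)
  else (none, "UNCORR", some st.2.1)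

def pvMD (a : List Char) (ws : List String) : Int :=
  (ws.map (fun w => pvHamdist a w.toList)).foldr min 11


theorem loopA_exact (a : List Char) (allow : Bool) (w : String) :
    ∀ (ws : List String) (b : Option String) (bd c : Int),
      ws.find? (fun v => pvHamdist a v.toList == 0) = some w →
      pvLoopA a allow ws b bd c = (some w, "EXACT", some 0) := by
  intro ws
  induction ws with
  | nil => intro b bd c h; simp at h
  | cons v t ih =>
    intro b bd c h
    by_cases hv : pvHamdist a v.toList = 0
    · rw [List.find?_cons_of_pos (by simp [hv])] at h
      simp only [Option.some.injEq] at h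
      subst h
      simp [pvLoopA, hv]
    · rw [List.find?_cons_of_neg (by simp [hv])] at h
      simp only [pvLoopA, if_neg hv]
      exact ih _ _ _ h

theorem loopA_no_exact (a : List Char) (allow : Bool) :
    ∀ (ws : List String) (b : Option String) (bd c : Int),
      (∀ v ∈ ws, pvHamdist a v.toList ≠ 0) →
      pvLoopA a allow ws b bd c = pvFin allow (pvMsF a ws (b, bd, c)) := by
  intro ws
  induction ws with
  | nil => intro b bd c _; rfl
  | cons v t ih =>
    intro b bd c h
    have hv : pvHamdist a v.toList ≠ 0 := h v (by simp)
    simp only [pvLoopA, pvMsF, if_neg hv]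
    split_ifs with h1 h2 <;>
      exact ih _ _ _ (fun x hx => h x (by simp [hx]))

theorem mD_le (a : List Char) : ∀ (ws : List String) (w : String), w ∈ ws →
    pvMD a ws ≤ pvHamdist a w.toList := by
  intro ws
  induction ws with
  | nil => intro w h; simp at h
  | cons v t ih =>
    intro w hw
    simp only [pvMD, List.map_cons, List.foldr_cons]
    rcases List.mem_cons.mp hw with h | h
    · subst h; exact min_le_left _ _
    · exact le_trans (min_le_right _ _) (ih w h)

theorem mD_le_ten (a : List Char) (ws : List String) (h : ws ≠ []) : pvMD a ws ≤ 10 := by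
  cases ws with
  | nil => simp at h
  | cons v t => exact le_trans (mD_le a _ v (by simp)) (hamdist_le_ten a v.toList)

theorem mD_cons (a : List Char) (v : String) (t : List String) :
    pvMD a (v :: t) = min (pvHamdist a v.toList) (pvMD a t) := by
  simp [pvMD]

theorem count_map_eq_zero (a : List Char) (t : List String) (x : Int) (hx : x < pvMD a t) :
    (t.map (fun w => pvHamdist a w.toList)).count x = 0 := by
  apply List.count_eq_zero_of_not_mem
  intro hmem
  rcases List.mem_map.mp hmem with ⟨w, hw, h⟩
  have := mD_le a t w hw
  omega

theorem msF_char (a : List Char) :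
    ∀ (ws : List String) (b : Option String) (bd c : Int), bd ≤ 11 →
      pvMsF a ws (b, bd, c) =
        (if pvMD a ws < bd then
           (ws.find? (fun w => pvHamdist a w.toList == pvMD a ws), pvMD a ws,
            ((ws.map (fun w => pvHamdist a w.toList)).count (pvMD a ws) : Int))
         else if pvMD a ws = bd then
           (b, bd, c + ((ws.map (fun w => pvHamdist a w.toList)).count bd : Int))
         else (b, bd, c)) := by
  intro ws
  induction ws with
  | nil =>
    intro b bd c hbd
    simp only [pvMsF, pvMD, List.map_nil, List.foldr_nil, List.find?_nil, List.count_nil]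
    rw [if_neg (by omega : ¬ (11 : Int) < bd)]
    by_cases h : (11 : Int) = bd
    · rw [if_pos h]; simp
    · rw [if_neg h]
  | cons v t ih =>
    intro b bd c hbd
    have hd0t := hamdist_le_ten a v.toList
    have hd0n := hamdist_nonneg a v.toList
    simp only [pvMsF]
    rcases lt_trichotomy (pvHamdist a v.toList) bd with hcmp | hcmp | hcmp
    · rw [if_pos hcmp, ih (some v) _ 1 (by omega)]
      rcases lt_trichotomy (pvMD a t) (pvHamdist a v.toList) with hm | hm | hm
      · rw [if_pos hm, mD_cons, min_eq_right hm.le, if_pos (by omega : pvMD a t < bd)]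
        rw [List.find?_cons_of_neg (by simp; omega)]
        simp only [List.map_cons, List.count_cons, Prod.mk.injEq]
        refine ⟨trivial, trivial, ?_⟩
        have : ¬ (pvHamdist a v.toList = pvMD a t) := by omega
        simp [this]
      · rw [if_neg (by omega), if_pos hm, mD_cons, min_eq_right hm.le, hm,
            if_pos (by omega : pvHamdist a v.toList < bd)]
        rw [List.find?_cons_of_pos (by simp)]
        simp only [List.map_cons, List.count_cons, Prod.mk.injEq]
        refine ⟨trivial, trivial, ?_⟩
        simp; omega
      · rw [if_neg (by omega), if_neg (by omega), mD_cons, min_eq_left hm.le,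
            if_pos (by omega : pvHamdist a v.toList < bd)]
        rw [List.find?_cons_of_pos (by simp)]
        have hz := count_map_eq_zero a t (pvHamdist a v.toList) hm
        simp only [List.map_cons, List.count_cons, Prod.mk.injEq]
        refine ⟨trivial, trivial, ?_⟩
        simp [hz]
    · rw [if_neg (by omega), if_pos hcmp, ih b bd (c + 1) hbd]
      rcases lt_trichotomy (pvMD a t) bd with hm | hm | hm
      · rw [if_pos hm, mD_cons, hcmp, min_eq_right hm.le, if_pos hm]
        rw [List.find?_cons_of_neg (by simp; omega)]
        simp only [List.map_cons, List.count_cons, Prod.mk.injEq]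
        refine ⟨trivial, trivial, ?_⟩
        have : ¬ (pvHamdist a v.toList = pvMD a t) := by omega
        simp [this]
      · rw [if_neg (by omega), if_pos hm, mD_cons, hcmp, min_eq_right hm.le, hm,
            if_neg (by omega : ¬ bd < bd), if_pos rfl]
        simp only [List.map_cons, List.count_cons, Prod.mk.injEq]
        refine ⟨trivial, trivial, ?_⟩
        have : pvHamdist a v.toList = bd := hcmp
        simp [this]; omega
      · rw [if_neg (by omega), if_neg (by omega), mD_cons, hcmp, min_eq_left hm.le,
            if_neg (by omega : ¬ bd < bd), if_pos rfl]
        have hz := count_map_eq_zero a t bd hm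
        simp only [List.map_cons, List.count_cons, Prod.mk.injEq]
        refine ⟨trivial, trivial, ?_⟩
        simp [hz, hcmp]
    · rw [if_neg (by omega), if_neg (by omega), ih b bd c hbd]
      rcases lt_trichotomy (pvMD a t) bd with hm | hm | hm
      · rw [if_pos hm, mD_cons, min_eq_right (by omega : pvMD a t ≤ pvHamdist a v.toList),
            if_pos hm]
        rw [List.find?_cons_of_neg (by simp; omega)]
        simp only [List.map_cons, List.count_cons, Prod.mk.injEq]
        refine ⟨trivial, trivial, ?_⟩
        have : ¬ (pvHamdist a v.toList = pvMD a t) := by omega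
        simp [this]
      · rw [if_neg (by omega), if_pos hm, mD_cons,
            min_eq_right (by omega : pvMD a t ≤ pvHamdist a v.toList), hm,
            if_neg (by omega : ¬ bd < bd), if_pos rfl]
        simp only [List.map_cons, List.count_cons, Prod.mk.injEq]
        refine ⟨trivial, trivial, ?_⟩
        have : ¬ (pvHamdist a v.toList = bd) := by omega
        simp [this]
      · rw [if_neg (by omega), if_neg (by omega), mD_cons]
        have hmin : bd < min (pvHamdist a v.toList) (pvMD a t) := lt_min hcmp hm
        rw [if_neg (by omega), if_neg (by omega)]

theorem foldr_min11_foldl :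
    ∀ (l : List Int) (d : Int), d ≤ 10 → (∀ x ∈ l, x ≤ 10) →
      min d (l.foldr min 11) = l.foldl min d := by
  intro l
  induction l with
  | nil => intro d hd _; simp; omega
  | cons x t ih =>
    intro d hd hl
    simp only [List.foldr_cons, List.foldl_cons]
    rw [← ih (min d x) (by have := hl x (by simp); omega)
          (fun y hy => hl y (by simp [hy]))]
    rw [min_assoc]

theorem index_bind_find (a : List Char) (v : Int) :
    ∀ (ws : List String),
      (PySem.List.index? (ws.map (fun w => pvHamdist a w.toList)) v).bind
          (fun i => PySem.List.pyGet? ws (i : Int)) =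
        ws.find? (fun w => pvHamdist a w.toList == v) := by
  intro ws
  induction ws with
  | nil => simp [PySem.List.index?_eq_idxOf?]
  | cons w t ih =>
    by_cases h : pvHamdist a w.toList = v
    · simp only [List.map_cons, h, PySem.List.index?_cons_self, Option.bind_some]
      rw [List.find?_cons_of_pos (by simp [h])]
      simp
    · rw [List.map_cons, PySem.List.index?_cons_of_ne _ h,
          List.find?_cons_of_neg (by simp [h])]
      rw [← ih]
      cases hidx : PySem.List.index? (t.map (fun w => pvHamdist a w.toList)) v with
      | none => simp
      | some i =>
        simp only [Option.map_some, Option.bind_some]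
        have : ((i + 1 : Nat) : Int) = (i : Int) + 1 := by push_cast; ring
        rw [this, PySem.List.pyGet?_cons_succ]

theorem find?_congr_mem {α : Type} (p q : α → Bool) :
    ∀ (l : List α), (∀ x ∈ l, p x = q x) → l.find? p = l.find? q := by
  intro l
  induction l with
  | nil => intro _; rfl
  | cons x t ih =>
    intro h
    have hx := h x (by simp)
    by_cases hp : p x = true
    · rw [List.find?_cons_of_pos hp, List.find?_cons_of_pos (by rw [← hx]; exact hp)]
    · rw [List.find?_cons_of_neg (by simpa using hp),
          List.find?_cons_of_neg (by rw [← hx]; simpa using hp)]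
      exact ih (fun y hy => h y (by simp [hy]))

-- ===== VERDICT (by name: the statement is the Claim_ definition above) =====
theorem correct_cb_10mer_spec : Claim_equal_correct_cb_10mer := by
  intro obs wl allow hdom hpre
  unfold Spec_correct_cb_10mer
  cases obs with
  | none => rfl
  | some s =>
    simp only [correct_cb_10mer, correct_cb_10mer_alt]
    by_cases hlen : s.toList.length = 10
    · rw [if_neg (by omega), if_neg (by omega)]
      have hw : ∀ w ∈ wl, 10 ≤ w.toList.length := by
        unfold Pre_correct_cb_10mer at hpre
        simp at hpre
        rcases hpre with h | h
        · exact absurd (by simpa using hlen) h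
        · intro w hmem; simpa using h w hmem
      have hdd : ∀ w ∈ wl, pvHamdist s.toList w.toList = pvMismatch s.toList w.toList :=
        fun w hm => hamdist_eq_mismatch _ _ hlen (hw w hm)
      have hpred : ∀ w ∈ wl,
          (pvHamdist s.toList w.toList == 0) = (w.toList.take 10 == s.toList) := by
        intro w hm
        have := hamdist_zero_iff s.toList w.toList hlen (hw w hm)
        by_cases h0 : pvHamdist s.toList w.toList = 0
        · simp [h0, this.mp h0]
        · have : ¬ w.toList.take 10 = s.toList := fun hc => h0 (this.mpr hc)
          simp [h0, this]
      have hmapeq : wl.map (fun w => pvMismatch s.toList w.toList)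
          = wl.map (fun w => pvHamdist s.toList w.toList) :=
        (List.map_congr_left (fun w hm => (hdd w hm).symm))
      cases hfind : wl.find? (fun w => w.toList.take 10 == s.toList) with
      | some w =>
        have : wl.find? (fun v => pvHamdist s.toList v.toList == 0) = some w := by
          rw [find?_congr_mem _ _ wl hpred]; exact hfind
        rw [loopA_exact s.toList allow w wl none 11 0 this]
      | none =>
        have hnz : ∀ v ∈ wl, pvHamdist s.toList v.toList ≠ 0 := by
          intro v hv h0
          have := List.find?_eq_none.mp (by rw [find?_congr_mem _ _ wl hpred]; exact hfind) v hv
          simp [h0] at this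
        rw [loopA_no_exact s.toList allow wl none 11 0 hnz,
            msF_char s.toList wl none 11 0 (by omega)]
        simp only [hmapeq]
        cases wl with
        | nil => simp [pvFin, pvMD, PySem.List.min?, PySem.List.count]
        | cons v t =>
          have hne : (v :: t) ≠ ([] : List String) := by simp
          have hm10 : pvMD s.toList (v :: t) ≤ 10 := mD_le_ten s.toList (v :: t) hne
          rw [if_pos (by omega : pvMD s.toList (v :: t) < 11)]
          have hmin : (PySem.List.min?
              ((v :: t).map (fun w => pvHamdist s.toList w.toList)) (fun x => x)).getD 11
              = pvMD s.toList (v :: t) := by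
            rw [List.map_cons, PySem.List.min?_id_cons]
            have hfl := foldr_min11_foldl (t.map (fun w => pvHamdist s.toList w.toList))
              (pvHamdist s.toList v.toList) (hamdist_le_ten _ _)
              (by intro x hx
                  rcases List.mem_map.mp hx with ⟨u, _, rfl⟩
                  exact hamdist_le_ten _ _)
            rw [Option.getD_some, ← hfl]
            simp [pvMD]
          rw [hmin]
          rw [PySem.List.count_eq]
          rw [index_bind_find s.toList (pvMD s.toList (v :: t)) (v :: t)]
          unfold pvFin
          split_ifs with h1 h2 h3 h4 h5 h6 h7 <;> dsimp only at * <;>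
            first
              | rfl
              | (exfalso; omega)
              | (exfalso; simp only [not_and] at *; tauto)
    · rw [if_pos hlen, if_pos hlen]
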